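-- pv_equiv track=rewrite | github.com/IExistAsAConstruct/I.D.I.O.T | extensions/emote_leaderboard/leaderboard.py | get_rank_for_count
-- ===== SOURCE A (Python) =====
-- MILESTONES = [
--     (1, "Beginner"),
--     (10, "Novice"),
--     (25, "Apprentice"),
--     (50, "Adept"),
--     (100, "Expert"),
--     (250, "Master"),
--     (500, "Grandmaster"),
--     (1000, "Legendary"),
--     (2000, "Mythic"),
--     (5000, "Impossible")
-- ]
--
-- def get_rank_for_count(count: int) -> tuple[str, int] | None:
--     """
--     Get the rank title for a given emoji count.
--
--     Args:
--         count (int): The emoji count.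
--
--     Returns:
--         tuple[str, int] | None: The rank title and milestone count, or None if no rank.
--     """
--     achieved_rank = None
--
--     for milestone, title in MILESTONES:
--         if count >= milestone:
--             achieved_rank = (title, milestone)
--         else:
--             break
--
--     return achieved_rank
-- ===== SOURCE B (Python) =====
-- MILESTONES = [
--     (1, "Beginner"),
--     (10, "Novice"),
--     (25, "Apprentice"),
--     (50, "Adept"),
--     (100, "Expert"),
--     (250, "Master"),
--     (500, "Grandmaster"),
--     (1000, "Legendary"),
--     (2000, "Mythic"),
--     (5000, "Impossible")
-- ]
--
-- def get_rank_for_count(count: int):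
--     # Binary search (hand-rolled bisect_right) over the sorted thresholds.
--     lo, hi = 0, len(MILESTONES)
--     while lo < hi:
--         mid = (lo + hi) // 2
--         if MILESTONES[mid][0] <= count:
--             lo = mid + 1
--         else:
--             hi = mid
--     if lo == 0:
--         return None
--     milestone, title = MILESTONES[lo - 1]
--     return (title, milestone)
-- ===== Notes on version B (the rewrite author's own statement) =====
-- stated objective: alternative
-- what changed: Replaced the linear accumulate-and-break scan over MILESTONES with a binary search (bisect_right) over the sorted thresholds, reading the answer off at index lo-1.
import Mathlib
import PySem

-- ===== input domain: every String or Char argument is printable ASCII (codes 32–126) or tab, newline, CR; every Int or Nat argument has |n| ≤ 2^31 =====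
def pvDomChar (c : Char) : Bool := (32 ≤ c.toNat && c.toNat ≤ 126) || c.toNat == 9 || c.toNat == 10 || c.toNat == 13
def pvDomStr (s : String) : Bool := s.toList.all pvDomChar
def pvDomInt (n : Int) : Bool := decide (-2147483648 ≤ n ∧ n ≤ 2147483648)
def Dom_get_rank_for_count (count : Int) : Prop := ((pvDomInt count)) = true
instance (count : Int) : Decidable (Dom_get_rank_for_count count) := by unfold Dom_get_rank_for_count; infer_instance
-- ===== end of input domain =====

-- B replaces A's linear accumulate-and-break scan with a binary search over the sorted thresholds (alternative algorithm).
-- ===== PORT A =====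
def pvMILESTONES : List (Int × String) := [
  (1, "Beginner"), (10, "Novice"), (25, "Apprentice"), (50, "Adept"),
  (100, "Expert"), (250, "Master"), (500, "Grandmaster"), (1000, "Legendary"),
  (2000, "Mythic"), (5000, "Impossible")]

-- the for-loop with break: recursion over the milestone list carrying achieved_rank
def pvScan (count : Int) : List (Int × String) → Option (String × Int) → Option (String × Int)
  | [], acc => acc
  | (milestone, title) :: rest, acc =>
      if count ≥ milestone then pvScan count rest (some (title, milestone)) else acc

def get_rank_for_count (count : Int) : Option (String × Int) :=
  pvScan count pvMILESTONES none

-- ===== PORT B =====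
-- the while-loop of Source B: lo/hi are nonnegative throughout, so Nat; (lo+hi)//2 = Nat division
def pvBs (count : Int) (lo hi : Nat) : Nat :=
  if lo < hi then
    let mid := (lo + hi) / 2
    if (pvMILESTONES.getD mid (0, "")).1 ≤ count then pvBs count (mid + 1) hi
    else pvBs count lo mid
  else lo
termination_by hi - lo
decreasing_by all_goals omega

def get_rank_for_count_alt (count : Int) : Option (String × Int) :=
  let lo := pvBs count 0 pvMILESTONES.length
  if lo = 0 then none
  else
    let p := pvMILESTONES.getD (lo - 1) (0, "")
    some (p.2, p.1)

-- ===== PRECONDITION & SPEC =====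
def Spec_get_rank_for_count (count : Int) (out : Option (String × Int)) : Prop := out = get_rank_for_count_alt count
instance (count : Int) (out : Option (String × Int)) : Decidable (Spec_get_rank_for_count count out) := by unfold Spec_get_rank_for_count; infer_instance

-- ===== CLAIM (what is proved, stated in full; the proofs are below) =====
def Claim_equal_get_rank_for_count : Prop := ∀ (count : Int), Dom_get_rank_for_count count → Spec_get_rank_for_count count (get_rank_for_count count)

-- ===== LEMMAS AND PROOFS =====

-- ===== VERDICT (by name: the statement is the Claim_ definition above) =====
theorem get_rank_for_count_spec : Claim_equal_get_rank_for_count := by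
  intro count _
  unfold Spec_get_rank_for_count get_rank_for_count get_rank_for_count_alt
  by_cases h1 : count ≥ 1 <;> by_cases h2 : count ≥ 10 <;> by_cases h3 : count ≥ 25 <;>
    by_cases h4 : count ≥ 50 <;> by_cases h5 : count ≥ 100 <;> by_cases h6 : count ≥ 250 <;>
    by_cases h7 : count ≥ 500 <;> by_cases h8 : count ≥ 1000 <;> by_cases h9 : count ≥ 2000 <;>
    by_cases h10 : count ≥ 5000 <;>
    first
      | (exfalso; omega)
      | simp [pvScan, pvMILESTONES, pvBs, h1, h2, h3, h4, h5, h6, h7, h8, h9, h10]
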